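-- pv_equiv track=rewrite | github.com/kaitj/adventofcode | day22/day22.py | process_path
-- ===== SOURCE A (Python) =====
-- def process_path(path_str: str) -> list:
--     idx = [0] + [i for i, c in enumerate(path_str) if c in ["L", "R"]] + [len(path_str)]
--     slices = [path_str[s:e] for s, e in list(zip(idx[:-1], idx[1:]))]
--     path = []
--     for i, s in enumerate(slices):
--         if i == 0:
--             dir = None
--             n = int(s)
--         else:
--             dir = s[0]
--             n = int(s[1:])
--         path.append((dir, n))
--     return path
-- ===== SOURCE B (Python) =====
-- def process_path(path_str: str) -> list:
--     # single streaming pass: a direction register and a number buffer replace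
--     # A's delimiter-index list, index-pair zip and slicing
--     path = []
--     cur_dir = None
--     num = ""
--     for c in path_str:
--         if c in ("L", "R"):
--             path.append((cur_dir, int(num)))
--             cur_dir = c
--             num = ""
--         else:
--             num += c
--     path.append((cur_dir, int(num)))
--     return path
-- ===== Notes on version B (the rewrite author's own statement) =====
-- stated objective: simpler
-- what changed: replaces A's delimiter-index list, zip of index pairs and per-segment slicing with a single streaming pass that keeps a direction register and a number buffer
import Mathlib
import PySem

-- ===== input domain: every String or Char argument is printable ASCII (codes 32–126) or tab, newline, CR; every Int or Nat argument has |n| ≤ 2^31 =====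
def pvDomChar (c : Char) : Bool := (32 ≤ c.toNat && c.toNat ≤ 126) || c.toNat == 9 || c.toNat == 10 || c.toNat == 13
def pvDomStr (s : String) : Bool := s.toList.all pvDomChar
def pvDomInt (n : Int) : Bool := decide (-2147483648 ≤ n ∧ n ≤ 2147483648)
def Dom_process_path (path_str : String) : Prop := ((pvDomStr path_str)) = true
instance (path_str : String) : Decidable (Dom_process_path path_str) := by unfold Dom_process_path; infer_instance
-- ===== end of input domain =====

-- B is a single streaming pass (direction register + number buffer) replacing A's
-- delimiter-index list, zip of index pairs and slicing; equivalence of the RETURN value is proved on Pre_.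

-- int(s) (Python raises ValueError where ofChars? is none; such inputs are outside Pre_)
def pvIntOf (cs : List Char) : Int := (PySem.Int.ofChars? cs).getD 0

-- ===== PORT A =====
def process_path (path_str : String) : List (Option String × Int) :=
  let cs := path_str.toList
  let idx : List Int :=
    [0] ++ ((PySem.List.enumerate cs 0).filter (fun p => p.2 == 'L' || p.2 == 'R')).map (·.1)
        ++ [(cs.length : Int)]
  let slices : List (List Char) :=
    ((PySem.List.slice idx none (some (-1))).zip (PySem.List.slice idx (some 1) none)).map
      (fun p => PySem.List.slice cs (some p.1) (some p.2))
  (PySem.List.enumerate slices 0).foldl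
    (fun path p =>
      if p.1 = 0 then
        path ++ [(none, pvIntOf p.2)]
      else
        path ++ [((PySem.List.pyGet? p.2 0).map (fun c => String.ofList [c]),
                  pvIntOf (PySem.List.slice p.2 (some 1) none))]) []

-- ===== PORT B =====
def pvStepB (st : List (Option String × Int) × Option String × List Char) (c : Char) :
    List (Option String × Int) × Option String × List Char :=
  if c == 'L' || c == 'R' then
    (st.1 ++ [(st.2.1, pvIntOf st.2.2)], some (String.ofList [c]), [])
  else
    (st.1, st.2.1, st.2.2 ++ [c])

def process_path_alt (path_str : String) : List (Option String × Int) :=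
  let st := path_str.toList.foldl pvStepB ([], none, [])
  st.1 ++ [(st.2.1, pvIntOf st.2.2)]

-- ===== PRECONDITION & SPEC =====
-- the maximal runs of non-'L'/'R' characters (the number chunks both programs feed to int())
def pvNums : List Char → List (List Char)
  | [] => [[]]
  | c :: rest =>
    if c == 'L' || c == 'R' then [] :: pvNums rest
    else
      match pvNums rest with
      | [] => [[c]]
      | n :: ns => (c :: n) :: ns

-- Pre_ excludes exactly the inputs on which A raises ValueError: some number chunk
-- (e.g. an empty one, for the empty string or a leading/doubled/trailing delimiter) is not an int literal.
def Pre_process_path (path_str : String) : Prop :=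
  (pvNums path_str.toList).all (fun n => (PySem.Int.ofChars? n).isSome) = true
instance (path_str : String) : Decidable (Pre_process_path path_str) := by
  unfold Pre_process_path; infer_instance

def pvWitness_process_path : String := "10R5L5"

def Spec_process_path (path_str : String) (out : List (Option String × Int)) : Prop := out = process_path_alt path_str
instance (path_str : String) (out : List (Option String × Int)) : Decidable (Spec_process_path path_str out) := by unfold Spec_process_path; infer_instance

-- ===== CLAIM (what is proved, stated in full; the proofs are below) =====
def Claim_equal_process_path : Prop := ∀ (path_str : String), Dom_process_path path_str → Pre_process_path path_str → Spec_process_path path_str (process_path path_str)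

-- ===== LEMMAS AND PROOFS =====

def pvND (c : Char) : Bool := !(c == 'L' || c == 'R')

-- common recursive specification: parse chunk by chunk
def parseChunks (d : Option String) (cs : List Char) : List (Option String × Int) :=
  match h : cs.dropWhile pvND with
  | [] => [(d, pvIntOf (cs.takeWhile pvND))]
  | c :: r => (d, pvIntOf (cs.takeWhile pvND)) :: parseChunks (some (String.ofList [c])) r
termination_by cs.length
decreasing_by
  have h1 := List.length_dropWhile_le pvND cs
  rw [h] at h1; simp at h1; omega

-- delimiter positions, recursively
def pvPos : List Char → List Int
  | [] => []
  | c :: r => if pvND c then (pvPos r).map (· + 1) else 0 :: (pvPos r).map (· + 1)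

def pvAdj (l : List Int) : List (Int × Int) := l.dropLast.zip l.tail

def pvSlices (cs : List Char) : List (List Char) :=
  (pvAdj ((0 : Int) :: (pvPos cs ++ [(cs.length : Int)]))).map
    (fun p => PySem.List.slice cs (some p.1) (some p.2))

def pvSegsF (c : Char) (r : List Char) : List (List Char) :=
  match h : r.dropWhile pvND with
  | [] => [c :: r.takeWhile pvND]
  | c' :: r' => (c :: r.takeWhile pvND) :: pvSegsF c' r'
termination_by r.length
decreasing_by
  have h1 := List.length_dropWhile_le pvND r
  rw [h] at h1; simp at h1; omega

def pvSegs (cs : List Char) : List (List Char) :=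
  match cs.dropWhile pvND with
  | [] => [cs.takeWhile pvND]
  | c :: r => cs.takeWhile pvND :: pvSegsF c r

def pvParseSeg (seg : List Char) : Option String × Int :=
  ((PySem.List.pyGet? seg 0).map (fun c => String.ofList [c]),
   pvIntOf (PySem.List.slice seg (some 1) none))

lemma enumFilter (cs : List Char) : ∀ s : Int,
    (((PySem.List.enumerate cs s).filter (fun p => p.2 == 'L' || p.2 == 'R')).map (·.1))
      = (pvPos cs).map (· + s) := by
  induction cs with
  | nil => intro s; simp [PySem.List.enumerate_nil, pvPos]
  | cons c r ih =>
    intro s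
    rw [PySem.List.enumerate_cons]
    by_cases hc : (c == 'L' || c == 'R') = true
    · simp only [List.filter_cons, hc, List.map_cons, pvPos, pvND, hc, Bool.not_true,
        if_true, Bool.false_eq_true, if_false]
      rw [ih (s+1)]
      simp [List.map_map, Function.comp]
      intro x _; omega
    · simp only [Bool.not_eq_true] at hc
      simp only [List.filter_cons, hc, pvPos, pvND, Bool.not_false, if_true,
        Bool.false_eq_true, if_false]
      rw [ih (s+1)]
      simp [List.map_map, Function.comp]
      intro x _; omega

lemma pvPos_nonneg (cs : List Char) : ∀ x ∈ pvPos cs, 0 ≤ x := by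
  induction cs with
  | nil => simp [pvPos]
  | cons c r ih =>
    intro x hx
    simp only [pvPos] at hx
    split at hx
    · simp only [List.mem_map] at hx
      obtain ⟨y, hy, rfl⟩ := hx
      have := ih y hy; omega
    · rcases List.mem_cons.1 hx with h | h
      · omega
      · simp only [List.mem_map] at h
        obtain ⟨y, hy, rfl⟩ := h
        have := ih y hy; omega

lemma pvPos_append (xs ys : List Char) :
    pvPos (xs ++ ys) = pvPos xs ++ (pvPos ys).map (· + (xs.length : Int)) := by
  induction xs with
  | nil => simp [pvPos]
  | cons c r ih =>
    simp only [List.cons_append, pvPos, ih, List.map_append, List.map_map]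
    split
    · congr 1
      apply List.map_congr_left; intro x _; simp [Function.comp]; push_cast; ring
    · rw [List.cons_append]
      congr 2
      apply List.map_congr_left; intro x _; simp [Function.comp]; push_cast; ring

lemma pvPos_nil_of_all (cs : List Char) (h : ∀ c ∈ cs, pvND c = true) : pvPos cs = [] := by
  induction cs with
  | nil => rfl
  | cons c r ih =>
    simp only [pvPos, h c (by simp), if_true]
    rw [ih (fun x hx => h x (by simp [hx]))]; rfl

lemma sliceShift (u r : List Char) (a b : Int) (ha : 0 ≤ a) (hb : 0 ≤ b) :
    PySem.List.slice (u ++ r) (some (a + (u.length : Int))) (some (b + (u.length : Int))) =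
      PySem.List.slice r (some a) (some b) := by
  rw [PySem.List.slice_toNat _ (by omega) (by omega),
      PySem.List.slice_toNat _ ha hb]
  have h1 : (a + (u.length : Int)).toNat = u.length + a.toNat := by omega
  have h2 : (b + (u.length : Int)).toNat - (u.length + a.toNat) = b.toNat - a.toNat := by omega
  rw [h1, h2]
  congr 1
  exact List.drop_length_add_append a.toNat


def pvConsHead (c : Char) : List (List Char) → List (List Char)
  | [] => []
  | s :: ss => (c :: s) :: ss

lemma pvAdj_cons (a b : Int) (l : List Int) : pvAdj (a :: b :: l) = (a, b) :: pvAdj (b :: l) := by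
  simp [pvAdj]

lemma headSlice (t r : List Char) (c : Char) (x : Int) (hx : 0 ≤ x) :
    PySem.List.slice (t ++ c :: r) (some (t.length : Int)) (some (x + ((t.length : Int) + 1))) =
      c :: PySem.List.slice r (some 0) (some x) := by
  rw [PySem.List.slice_toNat _ (by omega) (by omega), PySem.List.slice_toNat _ (by omega) hx]
  have h1 : ((t.length : Int)).toNat = t.length := by omega
  have h2 : (x + ((t.length : Int) + 1)).toNat - t.length = x.toNat + 1 := by omega
  rw [h1, h2]
  have h3 : (t ++ c :: r).drop t.length = c :: r := by
    simpa using List.drop_length_add_append (l₁ := t) (l₂ := c :: r) 0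
  rw [h3]
  simp

lemma adjShift (u r : List Char) : ∀ l : List Int, (∀ x ∈ l, 0 ≤ x) →
    (pvAdj (l.map (· + (u.length : Int)))).map
        (fun p => PySem.List.slice (u ++ r) (some p.1) (some p.2)) =
      (pvAdj l).map (fun p => PySem.List.slice r (some p.1) (some p.2)) := by
  intro l
  induction l with
  | nil => intro _; simp [pvAdj]
  | cons a l ih =>
    intro h
    cases l with
    | nil => simp [pvAdj]
    | cons b l' =>
      simp only [List.map_cons]
      rw [pvAdj_cons, pvAdj_cons]
      simp only [List.map_cons]
      rw [sliceShift u r a b (h a (by simp)) (h b (by simp))]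
      congr 1
      have h2 := ih (fun x hx => h x (List.mem_cons_of_mem _ hx))
      simpa using h2

lemma segsF_eq_consHead (c : Char) (r : List Char) :
    pvSegsF c r = pvConsHead c (pvSegs r) := by
  unfold pvSegsF pvSegs
  cases h : r.dropWhile pvND with
  | nil => simp [h, pvConsHead]
  | cons c' r' => simp [h, pvConsHead]

lemma ndc_of_dropWhile_cons {l : List Char} {c : Char} {r : List Char}
    (h : l.dropWhile pvND = c :: r) : pvND c = false := by
  have h2 := List.head_dropWhile_not pvND (l := l) (by simp [h])
  simpa [h] using h2

lemma slices_eq_segs_aux : ∀ n (cs : List Char), cs.length ≤ n → pvSlices cs = pvSegs cs := by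
  intro n
  induction n with
  | zero =>
    intro cs hlen
    have : cs = [] := by cases cs <;> simp_all
    subst this
    rfl
  | succ n ih =>
    intro cs hlen
    cases h : cs.dropWhile pvND with
    | nil =>
      have hall : ∀ x ∈ cs, pvND x = true := List.dropWhile_eq_nil_iff.1 h
      have ht : cs.takeWhile pvND = cs := List.takeWhile_eq_self_iff.2 hall
      have hp : pvPos cs = [] := pvPos_nil_of_all cs hall
      unfold pvSlices pvSegs
      rw [h, hp, ht]
      simp only [List.nil_append]
      rw [pvAdj_cons]
      simp only [pvAdj, List.dropLast_singleton, List.tail_cons, List.zip_nil_left,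
        List.map_cons, List.map_nil]
      rw [PySem.List.slice_toNat _ (by omega) (by omega)]
      simp
    | cons c r =>
      -- cs = t ++ c :: r with t the number prefix
      have hcs : cs.takeWhile pvND ++ c :: r = cs := by
        rw [← h]; exact List.takeWhile_append_dropWhile
      set t := cs.takeWhile pvND with hT
      have hndc : pvND c = false := ndc_of_dropWhile_cons h
      have hlenr : r.length ≤ n := by
        have : cs.length = t.length + 1 + r.length := by rw [← hcs]; simp; omega
        omega
      have ihr := ih r hlenr
      -- the position list of cs
      have hpos : pvPos cs = (t.length : Int) ::
          (pvPos r).map (· + ((t.length : Int) + 1)) := by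
        rw [← hcs, pvPos_append]
        rw [pvPos_nil_of_all t (by intro x hx; exact List.mem_takeWhile_imp hx)]
        simp only [pvPos, hndc, Bool.false_eq_true, if_false, List.nil_append, List.map_cons,
          List.map_map]
        congr 1
        · omega
        · apply List.map_congr_left; intro x _; simp [Function.comp]; ring
      -- destructure the shifted tail list
      obtain ⟨x, L, hL, hx0, hL0⟩ :
          ∃ x L, pvPos r ++ [(r.length : Int)] = x :: L ∧ 0 ≤ x ∧ ∀ y ∈ L, 0 ≤ y := by
        cases hP : pvPos r with
        | nil => exact ⟨(r.length : Int), [], by simp, by omega, by simp⟩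
        | cons x P' =>
          refine ⟨x, P' ++ [(r.length : Int)], by simp, ?_, ?_⟩
          · exact pvPos_nonneg r x (by simp [hP])
          · intro y hy
            rcases List.mem_append.1 hy with h1 | h1
            · exact pvPos_nonneg r y (by simp [hP, h1])
            · simp at h1; omega
      have hk : (cs.length : Int) = (r.length : Int) + ((t.length : Int) + 1) := by
        rw [← hcs]; push_cast; simp; omega
      have hlist : (0 : Int) :: (pvPos cs ++ [(cs.length : Int)]) =
          0 :: (t.length : Int) :: (x :: L).map (· + ((t.length : Int) + 1)) := by
        rw [hpos, ← hL]
        simp [hk]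
      -- now compute pvSlices cs
      unfold pvSlices
      rw [hlist, pvAdj_cons]
      simp only [List.map_cons]
      rw [pvAdj_cons]
      simp only [List.map_cons]
      -- tail beyond the first two pairs
      have htail : (pvAdj ((x + ((t.length : Int) + 1)) :: L.map (· + ((t.length : Int) + 1)))).map
            (fun p => PySem.List.slice cs (some p.1) (some p.2)) =
          (pvAdj (x :: L)).map (fun p => PySem.List.slice r (some p.1) (some p.2)) := by
        have hu : ((t ++ [c]).length : Int) = (t.length : Int) + 1 := by simp
        have := adjShift (t ++ [c]) r (x :: L) (by
          intro y hy; rcases List.mem_cons.1 hy with h1 | h1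
          · omega
          · exact hL0 y h1)
        rw [hu] at this
        simpa [← hcs, List.append_assoc] using this
      rw [htail]
      -- the first slice is t
      have hs0 : PySem.List.slice cs (some (0 : Int)) (some (t.length : Int)) = t := by
        rw [PySem.List.slice_toNat _ (by omega) (by omega)]
        simp only [Int.toNat_zero, Nat.sub_zero, List.drop_zero, Int.toNat_natCast]
        rw [← hcs]; exact List.take_left
      -- the second slice is c :: r[0:x]
      have hs1 : PySem.List.slice cs (some (t.length : Int))
            (some (x + ((t.length : Int) + 1))) = c :: PySem.List.slice r (some 0) (some x) := by
        rw [← hcs]; exact headSlice t r c x hx0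
      rw [hs0, hs1]
      -- fold the right-hand side: pvSlices r = slice r (0,x) :: tail
      have hr : pvSlices r = PySem.List.slice r (some 0) (some x) ::
          (pvAdj (x :: L)).map (fun p => PySem.List.slice r (some p.1) (some p.2)) := by
        unfold pvSlices
        rw [hL, pvAdj_cons]
        simp
      have hseg : pvSegs cs = t :: pvSegsF c r := by
        unfold pvSegs; rw [h]
      rw [hseg, segsF_eq_consHead, ← ihr, hr]
      rfl

lemma slices_eq_segs (cs : List Char) : pvSlices cs = pvSegs cs :=
  slices_eq_segs_aux cs.length cs le_rfl

lemma parseChunks_eq (d : Option String) (cs : List Char) :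
    parseChunks d cs =
      match cs.dropWhile pvND with
      | [] => [(d, pvIntOf (cs.takeWhile pvND))]
      | c :: r => (d, pvIntOf (cs.takeWhile pvND)) :: parseChunks (some (String.ofList [c])) r := by
  rw [parseChunks]
  cases h : cs.dropWhile pvND <;> simp [h]

lemma foldB (cs : List Char) :
    ∀ (acc : List (Option String × Int)) (d : Option String) (buf : List Char),
    (∀ c ∈ buf, pvND c = true) →
    (cs.foldl pvStepB (acc, d, buf)).1 ++
      [((cs.foldl pvStepB (acc, d, buf)).2.1, pvIntOf (cs.foldl pvStepB (acc, d, buf)).2.2)]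
      = acc ++ parseChunks d (buf ++ cs) := by
  induction cs with
  | nil =>
    intro acc d buf hbuf
    rw [List.foldl_nil, List.append_nil, parseChunks_eq,
      List.dropWhile_eq_nil_iff.2 hbuf, List.takeWhile_eq_self_iff.2 hbuf]
  | cons c cs ih =>
    intro acc d buf hbuf
    rw [List.foldl_cons]
    by_cases hc : pvND c = true
    · have hc' : (c == 'L' || c == 'R') = false := by simpa [pvND] using hc
      have hstep : pvStepB (acc, d, buf) c = (acc, d, buf ++ [c]) := by
        simp [pvStepB, hc']
      rw [hstep, ih acc d (buf ++ [c]) (by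
        intro y hy
        rcases List.mem_append.1 hy with h1 | h1
        · exact hbuf y h1
        · simp at h1; subst h1; exact hc)]
      simp
    · have hc' : (c == 'L' || c == 'R') = true := by
        revert hc; unfold pvND; cases (c == 'L' || c == 'R') <;> simp
      have hstep : pvStepB (acc, d, buf) c =
          (acc ++ [(d, pvIntOf buf)], some (String.ofList [c]), []) := by
        simp [pvStepB, hc']
      rw [hstep, ih _ _ [] (by simp)]
      rw [parseChunks_eq d (buf ++ c :: cs)]
      rw [List.dropWhile_append_of_pos hbuf, List.takeWhile_append_of_pos hbuf]
      have hndc : pvND c = false := by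
        revert hc; unfold pvND; cases (c == 'L' || c == 'R') <;> simp
      rw [List.dropWhile_cons_of_neg (by simp [hndc]),
        List.takeWhile_cons_of_neg (by simp [hndc])]
      simp

lemma alt_eq (s : String) : process_path_alt s = parseChunks none s.toList := by
  unfold process_path_alt
  have := foldB s.toList [] none [] (by simp)
  simpa using this

lemma loop_tail (rest : List (List Char)) : ∀ (s : Int), 1 ≤ s →
    ∀ (acc : List (Option String × Int)),
    (PySem.List.enumerate rest s).foldl
      (fun path p => if p.1 = 0 then path ++ [(none, pvIntOf p.2)]
        else path ++ [((PySem.List.pyGet? p.2 0).map (fun c => String.ofList [c]),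
                       pvIntOf p.2.tail)]) acc
      = acc ++ rest.map pvParseSeg := by
  induction rest with
  | nil => intro s _ acc; simp [PySem.List.enumerate_nil]
  | cons seg rest ih =>
    intro s hs acc
    rw [PySem.List.enumerate_cons, List.foldl_cons]
    have hs0 : ¬ (s = 0) := by omega
    simp only [hs0, if_false]
    rw [ih (s + 1) (by omega)]
    simp [pvParseSeg, PySem.List.slice_from_one]

lemma parseSeg_cons (c : Char) (tw : List Char) :
    pvParseSeg (c :: tw) = (some (String.ofList [c]), pvIntOf tw) := by
  unfold pvParseSeg
  rw [PySem.List.slice_from_one]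
  simp [PySem.List.pyGet?, PySem.List.pyIdx?]

lemma pvSegsF_eq (c : Char) (r : List Char) :
    pvSegsF c r = match r.dropWhile pvND with
      | [] => [c :: r.takeWhile pvND]
      | c' :: r' => (c :: r.takeWhile pvND) :: pvSegsF c' r' := by
  rw [pvSegsF]
  cases h : r.dropWhile pvND <;> simp [h]

lemma segsF_map_aux : ∀ n (r : List Char) (c : Char), r.length ≤ n →
    (pvSegsF c r).map pvParseSeg = parseChunks (some (String.ofList [c])) r := by
  intro n
  induction n with
  | zero =>
    intro r c hlen
    have : r = [] := by cases r <;> simp_all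
    subst this
    simp [pvSegsF, parseChunks_eq, parseSeg_cons]
  | succ n ih =>
    intro r c hlen
    rw [parseChunks_eq]
    cases h : r.dropWhile pvND with
    | nil =>
      have hseg : pvSegsF c r = [c :: r.takeWhile pvND] := by
        rw [pvSegsF_eq, h]
      rw [hseg]
      simp [parseSeg_cons]
    | cons c' r' =>
      have hseg : pvSegsF c r = (c :: r.takeWhile pvND) :: pvSegsF c' r' := by
        rw [pvSegsF_eq, h]
      have hr' : r'.length ≤ n := by
        have h1 := List.length_dropWhile_le pvND r
        rw [h] at h1; simp at h1; omega
      rw [hseg, List.map_cons, parseSeg_cons, ih r' c' hr']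

lemma a_eq (s : String) : process_path s = parseChunks none s.toList := by
  unfold process_path
  simp only [PySem.List.slice_to_neg_one, PySem.List.slice_from_one]
  have hidx : ([(0 : Int)] ++
        ((PySem.List.enumerate s.toList 0).filter (fun p => p.2 == 'L' || p.2 == 'R')).map (·.1)
        ++ [(s.toList.length : Int)])
      = (0 : Int) :: (pvPos s.toList ++ [(s.toList.length : Int)]) := by
    rw [enumFilter s.toList 0]
    simp
  rw [hidx]
  have hslices :
      ((((0 : Int) :: (pvPos s.toList ++ [(s.toList.length : Int)])).dropLast.zip
          (((0 : Int) :: (pvPos s.toList ++ [(s.toList.length : Int)])).tail)).map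
        (fun p => PySem.List.slice s.toList (some p.1) (some p.2))) = pvSegs s.toList := by
    rw [← slices_eq_segs]; rfl
  rw [hslices]
  rw [parseChunks_eq]
  cases h : s.toList.dropWhile pvND with
  | nil =>
    have hseg : pvSegs s.toList = [s.toList.takeWhile pvND] := by
      unfold pvSegs; rw [h]
    rw [hseg, PySem.List.enumerate_cons, PySem.List.enumerate_nil, List.foldl_cons]
    simp
  | cons c r =>
    have hseg : pvSegs s.toList = s.toList.takeWhile pvND :: pvSegsF c r := by
      unfold pvSegs; rw [h]
    rw [hseg, PySem.List.enumerate_cons, List.foldl_cons]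
    simp only [if_true, zero_add]
    rw [loop_tail (pvSegsF c r) 1 (by omega), segsF_map_aux r.length r c le_rfl]
    simp

-- ===== VERDICT (by name: the statement is the Claim_ definition above) =====
theorem process_path_spec : Claim_equal_process_path := by
  intro s _ _
  unfold Spec_process_path
  rw [a_eq, alt_eq]
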